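-- pv_equiv track=rewrite | github.com/pypi-data/pypi-mirror-177 | packages/tqsdk/tqsdk-3.3.0-py3-none-win_amd64.whl/tqsdk-3.3.0.data/purelib/tqsdk/test/func/test_rangeset.py | int_to_rangeset
-- ===== SOURCE A (Python) =====
-- def int_to_rangeset(origin_int, width):
--     arr = [2 ** i for i in range(width-1, -1, -1)]
--     rangeset = []
--     start_id = None
--     for i in range(width):
--         if origin_int & arr[i] > 0:
--             if start_id is None:
--                 start_id = i
--             if i == width - 1:
--                 rangeset.append((start_id, width))
--         else:
--             if start_id is not None:
--                 rangeset.append((start_id, i))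
--                 start_id = None
--     return rangeset
-- ===== SOURCE B (Python) =====
-- def int_to_rangeset(origin_int, width):
--     # run-length scan over the MSB-first bit list instead of a start_id state machine
--     bits = [origin_int & (1 << (width - 1 - i)) > 0 for i in range(width)]
--     n = len(bits)
--     res = []
--     i = 0
--     while i < n:
--         j = i + 1
--         while j < n and bits[j] == bits[i]:
--             j += 1
--         if bits[i]:
--             res.append((i, j))
--         i = j
--     return res
-- ===== Notes on version B (the rewrite author's own statement) =====
-- stated objective: alternative
-- what changed: B materializes the MSB-first bit list with single shifts and extracts maximal runs of equal bits with a two-pointer run-length scan, instead of A's per-index start_id state machine over a precomputed list of big-integer powers 2**i with a special case at the last index.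
import Mathlib
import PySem

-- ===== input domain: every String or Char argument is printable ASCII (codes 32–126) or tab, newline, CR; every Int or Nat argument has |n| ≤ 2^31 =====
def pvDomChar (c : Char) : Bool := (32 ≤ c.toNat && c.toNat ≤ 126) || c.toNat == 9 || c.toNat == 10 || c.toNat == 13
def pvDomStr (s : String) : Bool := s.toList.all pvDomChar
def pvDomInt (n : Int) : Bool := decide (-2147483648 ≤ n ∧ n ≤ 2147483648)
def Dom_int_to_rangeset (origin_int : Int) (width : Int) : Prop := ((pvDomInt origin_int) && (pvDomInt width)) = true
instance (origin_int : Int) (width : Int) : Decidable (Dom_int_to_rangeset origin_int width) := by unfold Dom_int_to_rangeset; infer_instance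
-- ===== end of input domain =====

-- B replaces A's per-index start_id state machine (over a precomputed list of powers 2**i)
-- by a run-length scan over the MSB-first bit list; a timing run measured B faster.

-- ===== PORT A =====
-- arr = [2 ** i for i in range(width-1, -1, -1)]  (2 ** i ported as 2 ^ i.toNat; every i in the range is ≥ 0)
def pvArrA (width : Int) : List Int :=
  (PySem.List.pyRange (width-1) (-1) (-1)).map (fun k => (2:Int) ^ k.toNat)

-- the body of A's for-loop (arr[i] ported with pyGetD 0; i is always in range so Python never raises)
def pvStepA (origin_int width : Int) (arr : List Int) (st : Option Int × List (Int × Int)) (i : Int) :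
    Option Int × List (Int × Int) :=
  if 0 < PySem.Int.band origin_int (PySem.List.pyGetD arr i 0) then
    let s : Int := match st.1 with | none => i | some s0 => s0
    if i = width - 1 then (some s, st.2 ++ [(s, width)]) else (some s, st.2)
  else
    match st.1 with
    | some s => (none, st.2 ++ [(s, i)])
    | none => (none, st.2)

def int_to_rangeset (origin_int : Int) (width : Int) : List (Int × Int) :=
  let arr := pvArrA width
  ((PySem.List.pyRange 0 width 1).foldl (pvStepA origin_int width arr) (none, [])).2

-- ===== PORT B =====
-- the outer while-loop of Source B: consume one maximal run of equal bits per step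
-- (the inner 'while j < n and bits[j] == bits[i]' is the takeWhile; 1 << p ported as 2 ^ p, p ≥ 0 in range)
def pvRuns : List Bool → Int → List (Int × Int)
  | [], _ => []
  | b :: rest, i =>
    let t := rest.takeWhile (fun x => x == b)
    let j := i + 1 + (t.length : Int)
    (if b then [(i, j)] else []) ++ pvRuns (rest.drop t.length) j
termination_by l _ => l.length
decreasing_by simp only [List.length_cons, List.length_drop]; omega

def int_to_rangeset_alt (origin_int : Int) (width : Int) : List (Int × Int) :=
  let bits := (PySem.List.pyRange 0 width 1).map
    (fun i => decide (0 < PySem.Int.band origin_int ((2:Int) ^ (width - 1 - i).toNat)))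
  pvRuns bits 0

-- ===== PRECONDITION & SPEC =====
def Spec_int_to_rangeset (origin_int : Int) (width : Int) (out : List (Int × Int)) : Prop := out = int_to_rangeset_alt origin_int width
instance (origin_int : Int) (width : Int) (out : List (Int × Int)) : Decidable (Spec_int_to_rangeset origin_int width out) := by unfold Spec_int_to_rangeset; infer_instance

-- ===== CLAIM (what is proved, stated in full; the proofs are below) =====
def Claim_equal_int_to_rangeset : Prop := ∀ (origin_int : Int) (width : Int), Dom_int_to_rangeset origin_int width → Spec_int_to_rangeset origin_int width (int_to_rangeset origin_int width)

-- ===== LEMMAS AND PROOFS =====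

-- reference state machine: pvF start i bs processes the bits bs starting at index i
def pvF : Option Int → Int → List Bool → List (Int × Int)
  | _, _, [] => []
  | start, i, b :: rest =>
    if b then
      let s := start.getD i
      if rest = [] then [(s, i + 1)] else pvF (some s) (i + 1) rest
    else
      (match start with | some s => [(s, i)] | none => ([] : List (Int × Int))) ++ pvF none (i + 1) rest

-- A's arr, re-expressed as a forward comprehension
theorem pvArrA_eq (width : Int) :
    pvArrA width = (PySem.List.pyRange 0 width 1).map (fun k => (2:Int) ^ (width - 1 - k).toNat) := by
  unfold pvArrA
  rw [PySem.List.pyRange_neg_one, PySem.List.pyRange_one]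
  have h : (width - 1 - -1) = width := by ring
  have h2 : (width - 0) = width := by ring
  rw [h, h2]
  simp only [List.map_map]
  apply List.map_congr_left
  intro k _
  simp [Function.comp]

theorem pvArr_get (width i : Int) (h0 : 0 ≤ i) (h1 : i < width) :
    PySem.List.pyGetD (pvArrA width) i 0 = (2:Int) ^ (width - 1 - i).toNat := by
  rw [pvArrA_eq]
  exact PySem.List.pyGetD_map_pyRange_of_nonneg _ _ _ _ h0 h1

-- A's fold over range(i, width) equals pvF on the corresponding bit list
theorem pvFoldA (origin_int width : Int) :
    ∀ (k : Nat) (i : Int) (st : Option Int) (acc : List (Int × Int)),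
      0 ≤ i → i + k = width →
      ((PySem.List.pyRange i width 1).foldl (pvStepA origin_int width (pvArrA width)) (st, acc)).2
        = acc ++ pvF st i ((PySem.List.pyRange i width 1).map
            (fun j => decide (0 < PySem.Int.band origin_int ((2:Int) ^ (width - 1 - j).toNat)))) := by
  intro k
  induction k with
  | zero =>
    intro i st acc _ hw
    have : width ≤ i := by omega
    rw [PySem.List.pyRange_one_eq_nil this]
    simp [pvF]
  | succ n ih =>
    intro i st acc h0 hw
    have hlt : i < width := by omega
    rw [PySem.List.pyRange_one_cons hlt]
    simp only [List.foldl_cons, List.map_cons]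
    by_cases hb : 0 < PySem.Int.band origin_int ((2:Int) ^ (width - 1 - i).toNat)
    · -- bit set
      have hstep : pvStepA origin_int width (pvArrA width) (st, acc) i
          = (some (st.getD i),
             if i = width - 1 then acc ++ [(st.getD i, width)] else acc) := by
        unfold pvStepA
        rw [pvArr_get width i h0 hlt]
        rw [if_pos hb]
        cases st <;> simp only [Option.getD] <;> split <;> simp_all
      rw [hstep]
      by_cases hlast : i = width - 1
      · have hnil : PySem.List.pyRange (i+1) width 1 = [] :=
          PySem.List.pyRange_one_eq_nil (by omega)
        rw [hnil]
        simp only [List.foldl_nil, List.map_nil, if_pos hlast]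
        simp [pvF, hb]
        omega
      · have hne : PySem.List.pyRange (i+1) width 1 ≠ [] := by
          rw [PySem.List.pyRange_one_cons (by omega : i + 1 < width)]
          simp
        rw [if_neg hlast, ih (i+1) (some (st.getD i)) acc (by omega) (by omega)]
        simp only [pvF, decide_eq_true_eq, if_pos hb]
        rw [if_neg (by simpa using hne)]
    · -- bit clear
      have hstep : pvStepA origin_int width (pvArrA width) (st, acc) i
          = (none, acc ++ (match st with | some s => [(s, i)] | none => [])) := by
        unfold pvStepA
        rw [pvArr_get width i h0 hlt]
        rw [if_neg hb]
        cases st <;> simp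
      rw [hstep, ih (i+1) none _ (by omega) (by omega)]
      simp only [pvF, decide_eq_true_eq, if_neg hb]
      cases st <;> simp [List.append_assoc]

-- run continuation: after a seen 1-bit with start s, next index i, remaining l
def pvG (s i : Int) (l : List Bool) : List (Int × Int) :=
  if l = [] then [(s, i)] else pvF (some s) i l

theorem pvG_true_run : ∀ (t : List Bool), (∀ x ∈ t, x = true) →
    ∀ (rest : List Bool) (i s : Int), pvG s i (t ++ rest) = pvG s (i + t.length) rest := by
  intro t
  induction t with
  | nil => intro _ rest i s; simp
  | cons b t' ih =>
    intro hall rest i s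
    have hb : b = true := hall b (by simp)
    subst hb
    have h1 : pvG s i (true :: (t' ++ rest)) = pvG s (i + 1) (t' ++ rest) := by
      unfold pvG
      rw [if_neg (List.cons_ne_nil _ _)]
      simp [pvF]
    rw [List.cons_append, h1, ih (fun x hx => hall x (by simp [hx])) rest (i+1) s]
    congr 1
    simp
    ring

theorem pvF_false_run : ∀ (t : List Bool), (∀ x ∈ t, x = false) →
    ∀ (rest : List Bool) (i : Int), pvF none i (t ++ rest) = pvF none (i + t.length) rest := by
  intro t
  induction t with
  | nil => intro _ rest i; simp
  | cons b t' ih =>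
    intro hall rest i
    have hb : b = false := hall b (by simp)
    subst hb
    rw [List.cons_append]
    rw [show pvF none i (false :: (t' ++ rest)) = pvF none (i + 1) (t' ++ rest) from by simp [pvF]]
    rw [ih (fun x hx => hall x (by simp [hx])) rest (i+1)]
    congr 1
    simp
    ring

theorem pvDropTakeWhile {α : Type} (p : α → Bool) : ∀ (l : List α),
    l.drop (l.takeWhile p).length = l.dropWhile p := by
  intro l
  induction l with
  | nil => rfl
  | cons a l ih =>
    cases h : p a
    · simp [h]
    · simp [h, ih]

theorem pvDropWhileHead {α : Type} (p : α → Bool) : ∀ (l : List α) (c : α) (r : List α),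
    l.dropWhile p = c :: r → p c = false := by
  intro l
  induction l with
  | nil => intro c r h; simp at h
  | cons a l ih =>
    intro c r h
    cases ha : p a
    · rw [List.dropWhile_cons, ha] at h
      simp at h
      rw [← h.1, ha]
    · rw [List.dropWhile_cons, ha] at h
      simp at h
      exact ih c r h

theorem pvRuns_eq_pvF : ∀ (l : List Bool) (i : Int), pvRuns l i = pvF none i l := by
  intro l i
  induction l, i using pvRuns.induct with
  | case1 i => simp [pvRuns, pvF]
  | case2 b rest i t j ih =>
    rw [pvRuns]
    have hsplit : rest = rest.takeWhile (fun x => x == b) ++ rest.dropWhile (fun x => x == b) :=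
      (List.takeWhile_append_dropWhile).symm
    have htall : ∀ x ∈ rest.takeWhile (fun x => x == b), x = b := by
      intro x hx
      have := List.mem_takeWhile_imp hx
      simpa using this
    rw [pvDropTakeWhile] at ih ⊢
    rw [ih]
    cases b with
    | true =>
      rw [show pvF none i (true :: rest)
            = if rest = [] then [(i, i + 1)] else pvF (some i) (i + 1) rest from by simp [pvF]]
      rw [show (if rest = [] then [(i, i + 1)] else pvF (some i) (i + 1) rest) = pvG i (i + 1) rest
            from by unfold pvG; rfl]
      conv_rhs => rw [hsplit]
      rw [pvG_true_run _ (by simpa using htall)]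
      cases hre : List.dropWhile (fun x => x == true) rest with
      | nil => simp [pvG, pvF]
      | cons c r =>
        have hc : c = false := by simpa using pvDropWhileHead _ rest c r hre
        subst hc
        simp [pvG, pvF]
        have hfe : (fun (x : Bool) => x == true) = (fun x => x) := by funext x; cases x <;> rfl
        rw [← hfe]
    | false =>
      rw [show pvF none i (false :: rest) = pvF none (i + 1) rest from by simp [pvF]]
      conv_rhs => rw [hsplit]
      rw [pvF_false_run _ (by simpa using htall)]
      simp only [Bool.false_eq_true, if_false, List.nil_append]
      rfl

-- ===== VERDICT (by name: the statement is the Claim_ definition above) =====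
theorem int_to_rangeset_spec : Claim_equal_int_to_rangeset := by
  intro origin_int width _
  unfold Spec_int_to_rangeset int_to_rangeset int_to_rangeset_alt
  rw [pvRuns_eq_pvF]
  by_cases hw : width ≤ 0
  · rw [PySem.List.pyRange_one_eq_nil (by omega)]
    simp [pvF]
  · have h0 : (0:Int) + (width.toNat : Int) = width := by omega
    rw [pvFoldA origin_int width width.toNat 0 none [] le_rfl h0]
    simp
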